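-- pv_equiv track=rewrite | github.com/robotman2412/Axolotl-Risc-V | zedboard_dev/hexmon.py | grabtoken
-- ===== SOURCE A (Python) =====
-- def grabtoken(raw: str):
-- 	"""Grabs a TOKEN from the STRING."""
-- 	wordc = "0123456789ABCDEFGHIJLKMNOPQRSTUVWXYZabcdefghijlkmnopqrstuvwxyz_"
-- 	# Remove leading writespace.
-- 	raw = raw.lstrip()
-- 	if len(raw) == 0:
-- 		return None, ""
-- 	elif raw[0] in wordc:
-- 		# Grab WORD.
-- 		for i in range(len(raw)):
-- 			if raw[i] not in wordc:
-- 				return raw[:i], raw[i:]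
-- 		return raw, ""
-- 	elif raw[0] == '\'' or raw[0] == '\"':
-- 		# Grab STRING.
-- 		esc = False
-- 		out = ''
-- 		for i in range(1, len(raw)):
-- 			if esc:
-- 				if raw[i] in '\'\"\\':
-- 					out += raw[i]
-- 				elif raw[i] == 'r':
-- 					out += '\r'
-- 				elif raw[i] == 'n':
-- 					out += '\n'
-- 				elif raw[i] == 'b':
-- 					out += '\b'
-- 				elif raw[i] == 't':
-- 					out += '\t'
-- 				elif raw[i] == 'f':
-- 					out += '\f'
-- 				elif raw[i] == '0':
-- 					out += '\0'
-- 				else: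
-- 					raise ValueError("Unknown escape sequence")
-- 				esc = False
-- 			elif raw[i] == '\\':
-- 				esc = True
-- 			elif raw[i] == raw[0]:
-- 				return raw[0] + out + raw[0], raw[i+1:]
-- 			else:
-- 				out += raw[i]
-- 		raise ValueError("Unclosed string")
-- 	else:
-- 		return raw[0], raw[1:]
-- ===== SOURCE B (Python) =====
-- def grabtoken(raw: str):
-- 	"""Grabs a TOKEN from the STRING."""
-- 	wordc = "0123456789ABCDEFGHIJLKMNOPQRSTUVWXYZabcdefghijlkmnopqrstuvwxyz_"
-- 	raw = raw.lstrip()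
-- 	if len(raw) == 0:
-- 		return None, ""
-- 	if raw[0] in wordc:
-- 		# Grab WORD: strip the word characters off the front, slice the token out.
-- 		rest = raw.lstrip(wordc)
-- 		return raw[:len(raw) - len(rest)], rest
-- 	if raw[0] in "'\"":
-- 		# Grab STRING: jump from special char to special char with str.find,
-- 		# copying whole chunks, instead of a per-character loop.
-- 		q = raw[0]
-- 		parts = []
-- 		i = 1
-- 		while True:
-- 			jq = raw.find(q, i)
-- 			jb = raw.find('\\', i)
-- 			if jq < 0:
-- 				raise ValueError("Unclosed string")
-- 			if jb < 0 or jq < jb: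
-- 				parts.append(raw[i:jq])
-- 				return q + ''.join(parts) + q, raw[jq + 1:]
-- 			# Backslash comes first: copy the chunk, decode one escape, jump past it.
-- 			if jb + 1 >= len(raw):
-- 				raise ValueError("Unclosed string")
-- 			k = "'\"\\rnbtf0".find(raw[jb + 1])
-- 			if k < 0:
-- 				raise ValueError("Unknown escape sequence")
-- 			parts.append(raw[i:jb])
-- 			parts.append("'\"\\\r\n\b\t\f\0"[k])
-- 			i = jb + 2
-- 	return raw[0], raw[1:]
-- ===== Notes on version B (the rewrite author's own statement) =====
-- stated objective: faster
-- what changed: The word branch drops its scan-and-return-inside-a-loop for a single lstrip(wordc) plus one slice, and the string branch replaces A's per-character loop carrying an esc flag by a jump scan: str.find locates the next quote and the next backslash, whole chunks between special characters are copied at once, and escapes are decoded by position lookup in parallel key/value strings.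
import Mathlib
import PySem

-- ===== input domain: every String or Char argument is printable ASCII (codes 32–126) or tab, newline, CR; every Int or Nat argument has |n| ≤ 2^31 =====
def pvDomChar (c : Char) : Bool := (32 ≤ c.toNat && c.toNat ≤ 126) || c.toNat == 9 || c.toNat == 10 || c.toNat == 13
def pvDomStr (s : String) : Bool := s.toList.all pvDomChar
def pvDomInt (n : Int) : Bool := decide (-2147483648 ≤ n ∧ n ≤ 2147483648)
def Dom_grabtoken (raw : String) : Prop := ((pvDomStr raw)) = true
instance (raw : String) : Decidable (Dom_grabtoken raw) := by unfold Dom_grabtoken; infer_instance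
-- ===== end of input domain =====

-- B replaces A's per-character loops: the word branch becomes lstrip(wordc) + one slice, and
-- the string branch becomes a str.find jump scan copying whole chunks between special
-- characters, decoding escapes by position lookup (objective: faster by a constant factor,
-- measured; same O(n) asymptotics).
-- Where Python A raises ValueError (unclosed string / unknown escape) both ports return the
-- placeholder (none, ""); those inputs are excluded by Pre_grabtoken.

-- ===== PORT A =====
def wordcA : List Char := "0123456789ABCDEFGHIJLKMNOPQRSTUVWXYZabcdefghijlkmnopqrstuvwxyz_".toList

-- A's WORD loop: first index i with raw[i] ∉ wordc gives (raw[:i], raw[i:]); end of loop gives (raw, "")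
def splitWordA : List Char → List Char × List Char
  | [] => ([], [])
  | c :: cs =>
    if c ∈ wordcA then
      let p := splitWordA cs
      (c :: p.1, p.2)
    else ([], c :: cs)

-- A's escape if-chain (some = char appended, none = ValueError "Unknown escape sequence")
def escA (c : Char) : Option Char :=
  if c ∈ ['\'', '"', '\\'] then some c
  else if c = 'r' then some (Char.ofNat 13)
  else if c = 'n' then some (Char.ofNat 10)
  else if c = 'b' then some (Char.ofNat 8)
  else if c = 't' then some (Char.ofNat 9)
  else if c = 'f' then some (Char.ofNat 12)
  else if c = '0' then some (Char.ofNat 0)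
  else none

-- A's STRING loop: one char per step, `esc` flag, `out` appended at the right;
-- none = ValueError (unclosed string / unknown escape)
def strLoopA (q : Char) (esc : Bool) (out : List Char) : List Char → Option (List Char × List Char)
  | [] => none
  | c :: cs =>
    if esc then
      match escA c with
      | some e => strLoopA q false (out ++ [e]) cs
      | none => none
    else if c = '\\' then strLoopA q true out cs
    else if c = q then some (q :: out ++ [q], cs)
    else strLoopA q esc (out ++ [c]) cs

def grabtoken (raw : String) : Option String × String :=
  match (PySem.Str.lstrip raw).toList with
  | [] => (none, "")
  | c :: cs =>
    if c ∈ wordcA then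
      let p := splitWordA (c :: cs)
      (some (String.ofList p.1), String.ofList p.2)
    else if c = '\'' ∨ c = '"' then
      match strLoopA c false [] cs with
      | some (tok, rest) => (some (String.ofList tok), String.ofList rest)
      | none => (none, "")   -- Python raises ValueError here; outside Pre_grabtoken
    else (some (String.ofList [c]), String.ofList cs)

-- ===== PORT B =====
def wordcB : List Char := "0123456789ABCDEFGHIJLKMNOPQRSTUVWXYZabcdefghijlkmnopqrstuvwxyz_".toList

-- Source B's parallel escape key/value strings and the positional lookup
--   k = "'\"\\rnbtf0".find(e);  "'\"\\\r\n\b\t\f\0"[k]   (none = k < 0 = unknown escape)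
def escKeysB : List Char := ['\'', '"', '\\', 'r', 'n', 'b', 't', 'f', '0']
def escValsB : List Char :=
  ['\'', '"', '\\', Char.ofNat 13, Char.ofNat 10, Char.ofNat 8, Char.ofNat 9, Char.ofNat 12, Char.ofNat 0]
def escB (e : Char) : Option Char :=
  match escKeysB.findIdx? (· == e) with
  | some k => escValsB[k]?   -- always in range: the value string is as long as the key string
  | none => none

-- Source B's jump scan over the suffix after the opening quote (Source B indexes raw from i; the
-- port carries the suffix raw[i:], so raw.find(x, i) is findIdx? on the suffix and the
-- chunk raw[i:j] is take; exact, step for step).  none = ValueError.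
def strLoopB (q : Char) (out : List Char) (tail : List Char) : Option (List Char × List Char) :=
  match tail.findIdx? (· == q), tail.findIdx? (· == '\\') with
  | none, _ => none   -- jq < 0: "Unclosed string"
  | some jq, none => some (q :: (out ++ tail.take jq) ++ [q], tail.drop (jq + 1))
  | some jq, some jb =>
    if jq < jb then some (q :: (out ++ tail.take jq) ++ [q], tail.drop (jq + 1))
    else if _h : tail.length ≤ jb + 1 then none   -- jb + 1 >= len(raw): "Unclosed string"
    else
      match escB (tail.getD (jb + 1) ' ') with   -- the index is in range by the guard
      | none => none   -- "Unknown escape sequence"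
      | some ch => strLoopB q (out ++ tail.take jb ++ [ch]) (tail.drop (jb + 2))
termination_by tail.length
decreasing_by simp only [List.length_drop]; omega

def grabtoken_alt (raw : String) : Option String × String :=
  match (PySem.Str.lstrip raw).toList with
  | [] => (none, "")
  | c :: cs =>
    if c ∈ wordcB then
      -- rest = raw.lstrip(wordc); return raw[:len(raw)-len(rest)], rest
      let l := c :: cs
      let rest := l.dropWhile (· ∈ wordcB)
      (some (String.ofList (l.take (l.length - rest.length))), String.ofList rest)
    else if c ∈ ['\'', '"'] then
      match strLoopB c [] cs with
      | some (tok, rest) => (some (String.ofList tok), String.ofList rest)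
      | none => (none, "")   -- Python raises ValueError here; outside Pre_grabtoken
    else (some (String.ofList [c]), String.ofList cs)

-- ===== PRECONDITION & SPEC =====
-- Grammar of a CLOSED quoted literal (a regular-language acceptor on the input, not a
-- computation of either port's output): the tail closes at an unescaped quote and every
-- backslash is followed by one of the nine legal escape characters.
def litClosed (q : Char) (esc : Bool) : List Char → Bool
  | [] => false
  | c :: cs =>
    if esc then decide (c ∈ ['\'', '"', '\\', 'r', 'n', 'b', 't', 'f', '0']) && litClosed q false cs
    else if c = '\\' then litClosed q true cs
    else if c = q then true
    else litClosed q false cs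

-- leading-whitespace skip = str.lstrip on the ASCII domain (space, tab, newline, CR)
def preB : List Char → Bool
  | [] => true
  | c :: cs =>
    if c = ' ' ∨ c = '\t' ∨ c = '\n' ∨ c = '\r' then preB cs
    else if c = '\'' ∨ c = '"' then litClosed c false cs
    else true

-- Pre_ excludes exactly the inputs on which Python A raises ValueError: after stripping,
-- a quote-led token whose literal is unclosed or contains an unknown escape sequence.
def Pre_grabtoken (raw : String) : Prop := preB raw.toList = true
instance (raw : String) : Decidable (Pre_grabtoken raw) := by unfold Pre_grabtoken; infer_instance
def pvWitness_grabtoken : String := "  'a\\n b' rest"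

def Spec_grabtoken (raw : String) (out : Option String × String) : Prop := out = grabtoken_alt raw
instance (raw : String) (out : Option String × String) : Decidable (Spec_grabtoken raw out) := by unfold Spec_grabtoken; infer_instance

-- ===== CLAIM (what is proved, stated in full; the proofs are below) =====
def Claim_equal_grabtoken : Prop := ∀ (raw : String), Dom_grabtoken raw → Pre_grabtoken raw → Spec_grabtoken raw (grabtoken raw)

-- ===== LEMMAS AND PROOFS =====

theorem wordcB_eq : wordcB = wordcA := rfl

theorem escB_eq_escA (e : Char) : escB e = escA e := by
  by_cases h1 : e = '\''
  · subst h1; decide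
  by_cases h2 : e = '"'
  · subst h2; decide
  by_cases h3 : e = '\\'
  · subst h3; decide
  by_cases h4 : e = 'r'
  · subst h4; decide
  by_cases h5 : e = 'n'
  · subst h5; decide
  by_cases h6 : e = 'b'
  · subst h6; decide
  by_cases h7 : e = 't'
  · subst h7; decide
  by_cases h8 : e = 'f'
  · subst h8; decide
  by_cases h9 : e = '0'
  · subst h9; decide
  have hk : escKeysB.findIdx? (· == e) = none := by
    simp [escKeysB, List.findIdx?_cons, Ne.symm h1, Ne.symm h2, Ne.symm h3, Ne.symm h4,
      Ne.symm h5, Ne.symm h6, Ne.symm h7, Ne.symm h8, Ne.symm h9]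
  simp [escB, hk, escA, h1, h2, h3, h4, h5, h6, h7, h8, h9]

-- A's word split is takeWhile/dropWhile
theorem splitWordA_eq (l : List Char) :
    splitWordA l = (l.takeWhile (· ∈ wordcA), l.dropWhile (· ∈ wordcA)) := by
  induction l with
  | nil => rfl
  | cons c cs ih => by_cases h : c ∈ wordcA <;> simp [splitWordA, h, ih]

-- B's slice raw[:len(raw)-len(rest)] is the takeWhile prefix
theorem take_sub_dropWhile (p : Char → Bool) (l : List Char) :
    l.take (l.length - (l.dropWhile p).length) = l.takeWhile p := by
  have h := List.takeWhile_append_dropWhile (p := p) (l := l)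
  have hlen : l.length - (l.dropWhile p).length = (l.takeWhile p).length := by
    have h2 := congrArg List.length h
    simp only [List.length_append] at h2; omega
  have t := List.take_left (l₁ := l.takeWhile p) (l₂ := l.dropWhile p)
  rw [h] at t
  rw [hlen, t]

-- if the quote never occurs, A's loop always raises
theorem strLoopA_none (q : Char) (l : List Char) (hq : q ∉ l) :
    ∀ (esc : Bool) (out : List Char), strLoopA q esc out l = none := by
  induction l with
  | nil => intro esc out; rfl
  | cons c cs ih =>
    intro esc out
    simp only [List.mem_cons, not_or] at hq
    cases esc with
    | true =>
      simp only [strLoopA]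
      cases hE : escA c with
      | none => simp
      | some ch => simpa using ih hq.2 false (out ++ [ch])
    | false =>
      by_cases hb : c = '\\'
      · simpa [strLoopA, hb] using ih hq.2 true out
      · have hc : ¬ c = q := fun h => hq.1 h.symm
        simpa [strLoopA, hb, hc] using ih hq.2 false (out ++ [c])

theorem strLoopB_nil (q : Char) (out : List Char) : strLoopB q out [] = none := by
  rw [strLoopB.eq_def]; simp

-- skipping an ordinary character commutes with B's jump scan
theorem strLoopB_skip (q : Char) (out : List Char) (c : Char) (cs : List Char)
    (hcq : ¬ c = q) (hcb : ¬ c = '\\') :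
    strLoopB q out (c :: cs) = strLoopB q (out ++ [c]) cs := by
  rw [strLoopB.eq_def, strLoopB.eq_def]
  simp only [List.findIdx?_cons, beq_iff_eq, hcq, hcb, if_false]
  cases hjq : cs.findIdx? (· == q) with
  | none => simp
  | some j =>
    cases hjb : cs.findIdx? (· == '\\') with
    | none => simp
    | some jb =>
      simp only [Option.map_some]
      by_cases hlt : j < jb
      · simp [hlt]
      · simp only [if_neg (by omega : ¬ j + 1 < jb + 1), if_neg hlt, List.length_cons,
          List.getD_cons_succ, List.take_succ_cons, List.drop_succ_cons]
        by_cases hg : cs.length ≤ jb + 1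
        · rw [dif_pos (by omega : cs.length + 1 ≤ jb + 1 + 1), dif_pos hg]
        · rw [dif_neg (by omega : ¬ cs.length + 1 ≤ jb + 1 + 1), dif_neg hg]
          cases escB (cs.getD (jb + 1) ' ') with
          | none => rfl
          | some ch => simp

theorem strLoop_eq_aux (q : Char) (hqb : ¬ q = '\\') :
    ∀ (n : Nat) (tail out : List Char), tail.length ≤ n →
      strLoopA q false out tail = strLoopB q out tail := by
  intro n
  induction n with
  | zero =>
    intro tail out h
    have : tail = [] := by cases tail <;> simp_all
    subst this
    simp [strLoopA, strLoopB_nil]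
  | succ n ih =>
    intro tail out hlen
    cases tail with
    | nil => simp [strLoopA, strLoopB_nil]
    | cons c cs =>
      simp only [List.length_cons] at hlen
      by_cases hc : c = q
      · -- closing quote: both return immediately
        subst hc
        rw [strLoopB.eq_def]
        simp only [strLoopA, Bool.false_eq_true, if_false, if_neg hqb,
          List.findIdx?_cons, beq_self_eq_true, beq_iff_eq]
        cases hjb : cs.findIdx? (· == '\\') with
        | none => simp
        | some jb => simp [(by omega : (0 : Nat) < jb + 1)]
      · by_cases hb : c = '\\'
        · -- escape: B consumes two characters at once
          subst hb
          cases cs with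
          | nil =>
            rw [strLoopB.eq_def]
            simp [strLoopA, List.findIdx?_cons, Ne.symm hqb]
          | cons e cs' =>
            have hstep : strLoopA q false out ('\\' :: e :: cs')
                = strLoopA q true out (e :: cs') := by
              simp [strLoopA]
            rw [hstep, strLoopB.eq_def]
            have hq1 : ('\\' :: e :: cs').findIdx? (· == q)
                = Option.map (· + 1) ((e :: cs').findIdx? (· == q)) := by
              simp [List.findIdx?_cons, Ne.symm hqb]
            have hb1 : ('\\' :: e :: cs').findIdx? (· == '\\') = some 0 := by
              simp [List.findIdx?_cons]
            rw [hq1, hb1]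
            simp only [strLoopA]
            cases hjq : (e :: cs').findIdx? (· == q) with
            | none =>
              -- no closing quote anywhere: A also ends in ValueError
              have hnot : q ∉ e :: cs' := by
                intro hmem
                have := List.findIdx?_eq_none_iff.mp hjq q hmem
                simp at this
              have hnot' : q ∉ cs' := fun h => hnot (List.mem_cons_of_mem _ h)
              cases hE : escA e with
              | none => simp
              | some ch =>
                simp [strLoopA_none q cs' hnot' false (out ++ [ch])]
            | some j =>
              simp only [Option.map_some, Nat.zero_add]
              rw [dif_neg (by simp : ¬ ('\\' :: e :: cs').length ≤ 1)]
              simp only [List.getD_cons_succ, List.getD_cons_zero, List.take_zero,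
                List.drop_succ_cons, List.drop_zero, escB_eq_escA]
              cases hE : escA e with
              | none => simp
              | some ch =>
                simp only [hE]
                simp only [if_pos trivial, if_neg (by omega : ¬ j + 1 < 0),
                  List.append_nil]
                exact ih cs' (out ++ [ch]) (by simp only [List.length_cons] at hlen; omega)
        · -- ordinary character: A copies it, B skips it
          simp only [strLoopA, Bool.false_eq_true, if_false, if_neg hb, if_neg hc]
          rw [ih cs (out ++ [c]) (by omega), strLoopB_skip q out c cs hc hb]

theorem strLoop_eq (q : Char) (hq : q = '\'' ∨ q = '"') (tail out : List Char) :
    strLoopA q false out tail = strLoopB q out tail := by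
  have hqb : ¬ q = '\\' := by rcases hq with h | h <;> subst h <;> decide
  exact strLoop_eq_aux q hqb tail.length tail out le_rfl

-- ===== VERDICT (by name: the statement is the Claim_ definition above) =====
theorem grabtoken_spec : Claim_equal_grabtoken := by
  intro raw _ _
  unfold Spec_grabtoken grabtoken grabtoken_alt
  match (PySem.Str.lstrip raw).toList with
  | [] => rfl
  | c :: cs =>
    by_cases hw : c ∈ wordcA
    · have hwb : c ∈ wordcB := hw
      simp only [if_pos hw, if_pos hwb, splitWordA_eq]
      rw [take_sub_dropWhile]
      rfl
    · by_cases hs : c = '\'' ∨ c = '"'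
      · have hsb : c ∈ ['\'', '"'] := by rcases hs with h | h <;> simp [h]
        simp only [if_neg hw, if_neg (show ¬ c ∈ wordcB from hw), if_pos hs, if_pos hsb,
          strLoop_eq c hs cs []]
      · have hsb : ¬ c ∈ ['\'', '"'] := by intro h; exact hs (by simpa using h)
        simp [wordcB_eq, hw, hs, hsb]
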